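-- pv_equiv track=rewrite | github.com/Grischaa/Scouting_ML | src/scouting_ml/scripts/build_national_team_caps.py | _detect_column_index
-- ===== SOURCE A (Python) =====
-- from typing import Dict, List, Sequence
--
-- def _detect_column_index(headers: Sequence[str], tokens: Sequence[str], fallback: int | None = None) -> int | None:
--     for i, header in enumerate(headers):
--         h = header.lower()
--         if all(tok in h for tok in tokens):
--             return i
--     for i, header in enumerate(headers):
--         h = header.lower()
--         if any(tok in h for tok in tokens):
--             return i
--     return fallback
-- ===== SOURCE B (Python) =====
-- def _detect_column_index(headers, tokens, fallback=None):
--     first_any = None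
--     for i, header in enumerate(headers):
--         h = header.lower()
--         if all(tok in h for tok in tokens):
--             return i
--         if first_any is None and any(tok in h for tok in tokens):
--             first_any = i
--     return first_any if first_any is not None else fallback
--
-- if __name__ == "__main__":
--     print(_detect_column_index(['A','B'],[]), _detect_column_index(['x','ab','b a'],['a','b']),
--           _detect_column_index(['x','qa','b'],['a','b']), _detect_column_index([],['a']),
--           _detect_column_index(['x'],['a'],7))
-- ===== Notes on version B (the rewrite author's own statement) =====
-- stated objective: simpler
-- what changed: Replaced A's two sequential scans over headers (first for an ALL-tokens match, then for an ANY-token match) by a single pass that returns immediately on an ALL-match while recording the first ANY-match in an accumulator used after the loop.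
import Mathlib
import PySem

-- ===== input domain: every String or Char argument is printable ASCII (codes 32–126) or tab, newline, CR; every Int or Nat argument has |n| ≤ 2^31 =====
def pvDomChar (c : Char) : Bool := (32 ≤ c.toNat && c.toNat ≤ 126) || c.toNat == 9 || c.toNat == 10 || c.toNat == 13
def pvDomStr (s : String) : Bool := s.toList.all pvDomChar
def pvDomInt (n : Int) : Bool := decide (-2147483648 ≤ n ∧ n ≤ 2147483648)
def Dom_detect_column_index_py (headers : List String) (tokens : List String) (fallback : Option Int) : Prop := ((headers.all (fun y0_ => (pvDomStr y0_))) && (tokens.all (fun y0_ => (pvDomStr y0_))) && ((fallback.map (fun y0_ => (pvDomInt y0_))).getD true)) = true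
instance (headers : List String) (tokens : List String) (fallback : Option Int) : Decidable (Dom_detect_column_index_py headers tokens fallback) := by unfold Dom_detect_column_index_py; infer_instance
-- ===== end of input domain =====

-- B fuses A's two scans into one pass with a first-any accumulator; same behaviour, simpler (objective: simpler, not faster).

-- ===== PORT A =====
-- first loop of A: return i on the first header containing ALL tokens
def pvAllLoop (tokens : List String) (i : Int) : List String → Option Int
  | [] => none
  | header :: rest =>
    let h := PySem.Str.lower header
    if tokens.all (fun tok => PySem.Str.isIn tok h) then some i
    else pvAllLoop tokens (i + 1) rest

-- second loop of A: return i on the first header containing ANY token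
def pvAnyLoop (tokens : List String) (i : Int) : List String → Option Int
  | [] => none
  | header :: rest =>
    let h := PySem.Str.lower header
    if tokens.any (fun tok => PySem.Str.isIn tok h) then some i
    else pvAnyLoop tokens (i + 1) rest

def detect_column_index_py (headers : List String) (tokens : List String) (fallback : Option Int) : Option Int :=
  match pvAllLoop tokens 0 headers with
  | some i => some i
  | none =>
    match pvAnyLoop tokens 0 headers with
    | some i => some i
    | none => fallback

-- ===== PORT B =====
-- single pass: return on ALL-match, record first ANY-match; after the loop use it, else fallback
def pvScan (tokens : List String) (fallback : Option Int) (i : Int) (firstAny : Option Int) : List String → Option Int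
  | [] =>
    match firstAny with
    | some j => some j
    | none => fallback
  | header :: rest =>
    let h := PySem.Str.lower header
    if tokens.all (fun tok => PySem.Str.isIn tok h) then some i
    else
      pvScan tokens fallback (i + 1)
        (if firstAny.isNone && tokens.any (fun tok => PySem.Str.isIn tok h) then some i else firstAny)
        rest

def detect_column_index_py_alt (headers : List String) (tokens : List String) (fallback : Option Int) : Option Int :=
  pvScan tokens fallback 0 none headers

-- ===== PRECONDITION & SPEC =====
def Spec_detect_column_index_py (headers : List String) (tokens : List String) (fallback : Option Int) (out : Option Int) : Prop := out = detect_column_index_py_alt headers tokens fallback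
instance (headers : List String) (tokens : List String) (fallback : Option Int) (out : Option Int) : Decidable (Spec_detect_column_index_py headers tokens fallback out) := by unfold Spec_detect_column_index_py; infer_instance

-- ===== CLAIM (what is proved, stated in full; the proofs are below) =====
def Claim_equal_detect_column_index_py : Prop := ∀ (headers : List String) (tokens : List String) (fallback : Option Int), Dom_detect_column_index_py headers tokens fallback → Spec_detect_column_index_py headers tokens fallback (detect_column_index_py headers tokens fallback)

-- ===== LEMMAS AND PROOFS =====
-- loop invariant: the fused scan equals "all-loop, then recorded firstAny, then any-loop, then fallback"
theorem pvScan_eq (tokens : List String) (fallback : Option Int) :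
    ∀ (hs : List String) (i : Int) (firstAny : Option Int),
      pvScan tokens fallback i firstAny hs =
        match pvAllLoop tokens i hs with
        | some j => some j
        | none =>
          match firstAny with
          | some j => some j
          | none =>
            match pvAnyLoop tokens i hs with
            | some j => some j
            | none => fallback := by
  intro hs
  induction hs with
  | nil => intro i firstAny; cases firstAny <;> simp [pvScan, pvAllLoop, pvAnyLoop]
  | cons header rest ih =>
    intro i firstAny
    simp only [pvScan, pvAllLoop, pvAnyLoop]
    by_cases hall : (tokens.all fun tok => PySem.Str.isIn tok (PySem.Str.lower header)) = true
    · rw [if_pos hall, if_pos hall]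
    · rw [if_neg hall, if_neg hall, ih]
      cases hrec : pvAllLoop tokens (i + 1) rest with
      | some j => simp only [hrec]
      | none =>
        simp only [hrec]
        cases firstAny with
        | some j => rfl
        | none =>
          cases hany : tokens.any (fun tok => PySem.Str.isIn tok (PySem.Str.lower header)) with
          | true => simp [hany]
          | false => simp [hany]

-- ===== VERDICT (by name: the statement is the Claim_ definition above) =====
theorem detect_column_index_py_spec : Claim_equal_detect_column_index_py := by
  intro headers tokens fallback _
  unfold Spec_detect_column_index_py detect_column_index_py detect_column_index_py_alt
  rw [pvScan_eq]
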